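-- pv_equiv track=rewrite | github.com/antoniopurificato/carbon_best | src/MOO/3a_elaborate_ndcg_sova.py | pick_data_perc
-- ===== SOURCE A (Python) =====
-- def pick_data_perc(ds_name, sova_dict):
--     """
--     Selects the most appropriate `data_perc` key for the given dataset across all runs.
--
--     The selection follows a priority order:
--         - '100' if available
--         - '0' if '100' is not available
--         - Otherwise, selects the first sorted key
--
--     Args:
--         ds_name (str): The name of the dataset for which to select the `data_perc`.
--         sova_dict (dict): The nested dictionary containing NDCG and SOVA metrics across multiple runs.
--
--     Returns:
--         Optional[str]: The selected `data_perc` key as a string, or None if no keys are available.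
--     """
--
--     all_data_percs_for_ds = set()
--     for run_idx, run_data in sova_dict.items():
--         ds_dict = run_data.get(ds_name, {})
--         all_data_percs_for_ds.update(ds_dict.keys())
--
--     if not all_data_percs_for_ds:
--         return None
--
--     if "100" in all_data_percs_for_ds:
--         return "100"
--     elif "0" in all_data_percs_for_ds:
--         return "0"
--     else:
--         sorted_percs = sorted(all_data_percs_for_ds)
--         return sorted_percs[0] if sorted_percs else None
-- ===== SOURCE B (Python) =====
-- def pick_data_perc(ds_name, sova_dict):
--     # One pass, no set: maintain has-100 / has-0 flags and the lexicographically
--     # smallest key seen (None if none).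
--     has_100 = False
--     has_0 = False
--     min_key = None
--     for run_idx, run_data in sova_dict.items():
--         ds_dict = run_data.get(ds_name, {})
--         for k in ds_dict.keys():
--             if k == "100":
--                 has_100 = True
--             if k == "0":
--                 has_0 = True
--             if min_key is None or k < min_key:
--                 min_key = k
--     if has_100:
--         return "100"
--     if has_0:
--         return "0"
--     return min_key
-- ===== Notes on version B (the rewrite author's own statement) =====
-- stated objective: alternative
-- what changed: B replaces A's intermediate set plus membership tests plus full sort with a single pass that maintains has-100/has-0 flags and a running lexicographic minimum key.
import Mathlib
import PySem

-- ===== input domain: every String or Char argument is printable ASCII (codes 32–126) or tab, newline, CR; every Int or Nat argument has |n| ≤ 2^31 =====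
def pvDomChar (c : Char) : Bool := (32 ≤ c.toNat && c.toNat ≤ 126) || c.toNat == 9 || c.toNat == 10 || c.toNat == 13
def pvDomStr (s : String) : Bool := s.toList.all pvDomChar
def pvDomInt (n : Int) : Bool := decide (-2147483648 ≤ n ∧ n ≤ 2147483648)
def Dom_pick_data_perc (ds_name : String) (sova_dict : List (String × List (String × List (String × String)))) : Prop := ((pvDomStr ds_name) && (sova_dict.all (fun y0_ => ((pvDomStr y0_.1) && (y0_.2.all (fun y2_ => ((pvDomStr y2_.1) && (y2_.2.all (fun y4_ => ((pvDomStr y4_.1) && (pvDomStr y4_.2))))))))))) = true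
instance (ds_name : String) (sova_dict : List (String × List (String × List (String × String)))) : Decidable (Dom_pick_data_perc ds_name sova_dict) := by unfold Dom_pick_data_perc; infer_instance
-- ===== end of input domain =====

-- B replaces A's set-building + membership tests + sort with a single pass keeping
-- two flags and a running lexicographic minimum (objective: alternative decomposition, no sort).


-- ===== PORT A =====
-- run_data.get(ds_name, {}).keys() — first-match association-list lookup, keys in order
def pdpKeys (ds_name : String) (run_data : List (String × List (String × String))) : List String :=
  ((PySem.Dict.mk run_data).getD ds_name []).map Prod.fst

def pick_data_perc (ds_name : String) (sova_dict : List (String × List (String × List (String × String)))) : Option String :=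
  let all_data_percs_for_ds : PySem.Set String :=
    sova_dict.foldl (fun acc r => PySem.Set.update acc (pdpKeys ds_name r.2)) PySem.Set.empty
  if all_data_percs_for_ds = [] then none
  else if "100" ∈ all_data_percs_for_ds then some "100"
  else if "0" ∈ all_data_percs_for_ds then some "0"
  else
    match PySem.List.sorted all_data_percs_for_ds (fun x => x) false with
    | [] => none
    | m :: _ => some m

-- ===== PORT B =====
-- single-pass accumulator: (has_100, has_0, running lexicographic minimum)
def pdpStep (a : Bool × Bool × Option String) (k : String) : Bool × Bool × Option String :=
  (a.1 || (k == "100"), a.2.1 || (k == "0"),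
   match a.2.2 with
   | none => some k
   | some m => if k < m then some k else some m)

def pick_data_perc_alt (ds_name : String) (sova_dict : List (String × List (String × List (String × String)))) : Option String :=
  let a : Bool × Bool × Option String :=
    sova_dict.foldl (fun a r => (pdpKeys ds_name r.2).foldl pdpStep a) (false, false, none)
  if a.1 then some "100"
  else if a.2.1 then some "0"
  else a.2.2

-- ===== PRECONDITION & SPEC =====
def Spec_pick_data_perc (ds_name : String) (sova_dict : List (String × List (String × List (String × String)))) (out : Option String) : Prop := out = pick_data_perc_alt ds_name sova_dict
instance (ds_name : String) (sova_dict : List (String × List (String × List (String × String)))) (out : Option String) : Decidable (Spec_pick_data_perc ds_name sova_dict out) := by unfold Spec_pick_data_perc; infer_instance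

-- ===== CLAIM (what is proved, stated in full; the proofs are below) =====
def Claim_equal_pick_data_perc : Prop := ∀ (ds_name : String) (sova_dict : List (String × List (String × List (String × String)))), Dom_pick_data_perc ds_name sova_dict → Spec_pick_data_perc ds_name sova_dict (pick_data_perc ds_name sova_dict)

-- ===== LEMMAS AND PROOFS =====

-- all keys contributing to the selection, as one flat list
def pdpAll (ds_name : String) (sova_dict : List (String × List (String × List (String × String)))) : List String :=
  sova_dict.flatMap (fun r => pdpKeys ds_name r.2)

-- the running-minimum component of pdpStep
def pdpMin (o : Option String) (k : String) : Option String :=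
  match o with
  | none => some k
  | some m => if k < m then some k else some m

lemma foldl_flatMap_eq {α β γ : Type} (g : α → List β) (f : γ → β → γ) :
    ∀ (xs : List α) (init : γ),
      xs.foldl (fun a x => (g x).foldl f a) init = (xs.flatMap g).foldl f init := by
  intro xs
  induction xs with
  | nil => intro init; rfl
  | cons x t ih => intro init; simp [List.foldl_append, ih]

lemma setA_eq (ds_name : String) (sova_dict : List (String × List (String × List (String × String)))) :
    sova_dict.foldl (fun acc r => PySem.Set.update acc (pdpKeys ds_name r.2)) PySem.Set.empty
      = PySem.Set.ofList (pdpAll ds_name sova_dict) := by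
  have h : ∀ (acc : PySem.Set String) (ks : List String),
      PySem.Set.update acc ks = ks.foldl (fun a k => PySem.Set.add a k) acc :=
    fun acc ks => PySem.Set.update_eq_foldl acc ks
  simp only [h]
  exact foldl_flatMap_eq (fun r => pdpKeys ds_name r.2) (fun a k => PySem.Set.add a k)
    sova_dict PySem.Set.empty

lemma foldB_eq (ds_name : String) (sova_dict : List (String × List (String × List (String × String)))) :
    sova_dict.foldl (fun a r => (pdpKeys ds_name r.2).foldl pdpStep a) (false, false, none)
      = (pdpAll ds_name sova_dict).foldl pdpStep (false, false, none) :=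
  foldl_flatMap_eq (fun r => pdpKeys ds_name r.2) pdpStep sova_dict (false, false, none)

-- component split of the B fold
lemma foldB_split : ∀ (L : List String) (a : Bool × Bool × Option String),
    L.foldl pdpStep a =
      (L.foldl (fun b k => b || (k == "100")) a.1,
       L.foldl (fun b k => b || (k == "0")) a.2.1,
       L.foldl pdpMin a.2.2) := by
  intro L
  induction L with
  | nil => intro a; rfl
  | cons x t ih => intro a; simp [List.foldl_cons, pdpStep, pdpMin, ih]

lemma foldOr_spec (s : String) : ∀ (L : List String) (b : Bool),
    L.foldl (fun b k => b || (k == s)) b = (b || decide (s ∈ L)) := by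
  intro L
  induction L with
  | nil => intro b; simp
  | cons x t ih =>
    intro b
    by_cases hx : x = s
    · subst hx; simp [ih]
    · have hb : (x == s) = false := by simp [hx]
      simp [ih, hb, Ne.symm hx]

lemma foldMin_some_spec : ∀ (L : List String) (m : String),
    ∃ m', L.foldl pdpMin (some m) = some m' ∧ m' ∈ m :: L ∧ ∀ y ∈ m :: L, m' ≤ y := by
  intro L
  induction L with
  | nil => intro m; exact ⟨m, rfl, by simp, by simp⟩
  | cons k t ih =>
    intro m
    by_cases hk : k < m
    · obtain ⟨m', h1, h2, h3⟩ := ih k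
      refine ⟨m', ?_, ?_, ?_⟩
      · have hstep : pdpMin (some m) k = some k := by show (if k < m then some k else some m) = some k; rw [if_pos hk]
        rw [List.foldl_cons, hstep]; exact h1
      · simp only [List.mem_cons] at h2 ⊢
        tauto
      · intro y hy
        rcases List.mem_cons.mp hy with rfl | hy'
        · exact le_of_lt (lt_of_le_of_lt (h3 k (by simp)) hk)
        · exact h3 y hy'
    · obtain ⟨m', h1, h2, h3⟩ := ih m
      refine ⟨m', ?_, ?_, ?_⟩
      · have hstep : pdpMin (some m) k = some m := by show (if k < m then some k else some m) = some m; rw [if_neg hk]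
        rw [List.foldl_cons, hstep]; exact h1
      · simp only [List.mem_cons] at h2 ⊢
        tauto
      · intro y hy
        rcases List.mem_cons.mp hy with rfl | hy'
        · exact h3 y (by simp)
        rcases List.mem_cons.mp hy' with rfl | hy''
        · exact le_trans (h3 m (by simp)) (not_lt.mp hk)
        · exact h3 y (by simp [hy''])

-- ===== VERDICT (by name: the statement is the Claim_ definition above) =====
theorem pick_data_perc_spec : Claim_equal_pick_data_perc := by
  intro ds_name sova_dict _
  unfold Spec_pick_data_perc pick_data_perc pick_data_perc_alt
  rw [setA_eq, foldB_eq, foldB_split, foldOr_spec, foldOr_spec]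
  simp only [Bool.false_or]
  generalize pdpAll ds_name sova_dict = L
  by_cases h100 : "100" ∈ L
  · have hS : "100" ∈ PySem.Set.ofList L := (PySem.Set.mem_ofList L _).mpr h100
    have hne : PySem.Set.ofList L ≠ [] := by
      intro hnil; rw [hnil] at hS; exact List.not_mem_nil hS
    rw [if_neg hne, if_pos hS]
    simp [h100]
  · have hS100 : "100" ∉ PySem.Set.ofList L := fun hc => h100 ((PySem.Set.mem_ofList L _).mp hc)
    by_cases h0 : "0" ∈ L
    · have hS : "0" ∈ PySem.Set.ofList L := (PySem.Set.mem_ofList L _).mpr h0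
      have hne : PySem.Set.ofList L ≠ [] := by
        intro hnil; rw [hnil] at hS; exact List.not_mem_nil hS
      rw [if_neg hne, if_neg hS100, if_pos hS]
      simp [h100, h0]
    · have hS0 : "0" ∉ PySem.Set.ofList L := fun hc => h0 ((PySem.Set.mem_ofList L _).mp hc)
      cases L with
      | nil => simp
      | cons k t =>
        have hkS : k ∈ PySem.Set.ofList (k :: t) :=
          (PySem.Set.mem_ofList _ _).mpr (List.mem_cons_self)
        have hne : PySem.Set.ofList (k :: t) ≠ [] := by
          intro hnil; rw [hnil] at hkS; exact List.not_mem_nil hkS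
        rw [if_neg hne, if_neg hS100, if_neg hS0]
        simp only [h100, h0, decide_false, Bool.false_eq_true, if_false]
        -- B side: running minimum over k :: t
        obtain ⟨m', hfold, hmem, hmin⟩ := foldMin_some_spec t k
        have hB : (k :: t).foldl pdpMin none = some m' := by
          rw [List.foldl_cons]; exact hfold
        rw [hB]
        -- A side: head of the sorted set
        have hsne : PySem.List.sorted (PySem.Set.ofList (k :: t)) (fun x => x) false ≠ [] := by
          intro hc
          exact hne ((PySem.List.sorted_eq_nil_iff _ _ _).mp hc)
        cases hsort : PySem.List.sorted (PySem.Set.ofList (k :: t)) (fun x => x) false with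
        | nil => exact absurd hsort hsne
        | cons ms ts =>
          have hmsS : ms ∈ PySem.Set.ofList (k :: t) :=
            (PySem.List.mem_sorted _ _ _ _).mp (by rw [hsort]; exact List.mem_cons_self)
          have hmsMin : ∀ y ∈ PySem.Set.ofList (k :: t), ms ≤ y :=
            PySem.List.key_head_sorted_le _ _ hsort
          have heq : ms = m' := le_antisymm
            (hmsMin m' ((PySem.Set.mem_ofList _ _).mpr hmem))
            (hmin ms ((PySem.Set.mem_ofList _ _).mp hmsS))
          simp [heq]
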